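-- pv_equiv track=rewrite | github.com/DonalFlanagan/CyberdyneCollective | an_fadhb/nlp/Diarmaid1.py | assign_value
-- ===== SOURCE A (Python) =====
-- from collections import Counter
--
-- def assign_value(words):
--     """
--     This is where you rank the words. Takes in a list of words, and returns a list of lists, with the inner list holding the word and the value
--     [
--      [word, value],
--      [word, value],
--      [word, value],
--         :       :
--         :       :
--      [word, value],
--      [word, value],
--      [word, value]
--     ]
--     """
--     w_counts = Counter(words)
--     word_and_value = []
--     for w in w_counts:
--         if w.count(' ') == 0:
--             mult = 1
--         else:
--             mult = w.count(' ') + 1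
--
--         word_and_value.append([w, w_counts[w] * mult])
--     return word_and_value
-- ===== SOURCE B (Python) =====
-- def assign_value(words):
--     """Dict-free extract-and-filter ranking: repeatedly take the first remaining
--     word, emit [word, occurrences * (spaces+1)], and filter out all its copies."""
--     word_and_value = []
--     remaining = list(words)
--     while remaining:
--         w = remaining[0]
--         word_and_value.append([w, remaining.count(w) * (w.count(' ') + 1)])
--         remaining = [x for x in remaining if x != w]
--     return word_and_value
-- ===== Notes on version B (the rewrite author's own statement) =====
-- stated objective: alternative
-- what changed: Replaces Counter hashing plus a loop over unique words by a dict-free extract-and-filter loop: repeatedly take the first remaining word, compute its value by scanning the remaining list, and filter out all its occurrences; first-occurrence output order arises from the filtering itself.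
import Mathlib
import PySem

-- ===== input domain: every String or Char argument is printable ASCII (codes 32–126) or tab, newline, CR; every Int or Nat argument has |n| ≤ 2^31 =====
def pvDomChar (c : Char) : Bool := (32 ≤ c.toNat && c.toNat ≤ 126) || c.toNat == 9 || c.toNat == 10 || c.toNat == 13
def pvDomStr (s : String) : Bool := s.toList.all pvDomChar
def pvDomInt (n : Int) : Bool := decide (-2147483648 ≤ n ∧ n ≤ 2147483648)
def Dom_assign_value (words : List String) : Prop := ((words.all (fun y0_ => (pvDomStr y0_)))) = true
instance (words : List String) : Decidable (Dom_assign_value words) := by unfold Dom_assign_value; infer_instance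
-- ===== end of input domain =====

-- B replaces Counter + a loop over unique words by a dict-free extract-and-filter loop (alternative algorithm; not faster).

-- ===== PORT A =====
def assign_value (words : List String) : List (String × Int) :=
  let w_counts := PySem.Dict.counter words
  w_counts.keys.foldl (fun acc w =>
    let mult : Int := if PySem.Str.count w " " = 0 then 1 else (PySem.Str.count w " " : Int) + 1
    acc ++ [(w, w_counts.getD w 0 * mult)]) []

-- ===== PORT B =====
-- while remaining: take head w, emit (w, remaining.count(w) * (w.count(' ')+1)), filter out w
def assign_value_alt : List String → List (String × Int)
  | [] => []
  | w :: rest =>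
      (w, (((w :: rest).count w : Int)) * ((PySem.Str.count w " " : Int) + 1)) ::
        assign_value_alt ((w :: rest).filter (fun x => x ≠ w))
termination_by l => l.length
decreasing_by
  simp only [List.filter_cons, ne_eq, not_true_eq_false, decide_false]
  exact Nat.lt_succ_of_le (List.length_filter_le _ _)

-- ===== PRECONDITION & SPEC =====
def Spec_assign_value (words : List String) (out : List (String × Int)) : Prop := out = assign_value_alt words
instance (words : List String) (out : List (String × Int)) : Decidable (Spec_assign_value words out) := by unfold Spec_assign_value; infer_instance

-- ===== CLAIM (what is proved, stated in full; the proofs are below) =====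
def Claim_equal_assign_value : Prop := ∀ (words : List String), Dom_assign_value words → Spec_assign_value words (assign_value words)

-- ===== LEMMAS AND PROOFS =====

-- elements already in the set are no-ops for Set.add, so they may be filtered away
theorem pvFoldlAdd_filter (l : List String) (s : PySem.Set String) (w : String) (hw : w ∈ s) :
    l.foldl PySem.Set.add s = (l.filter (fun x => x ≠ w)).foldl PySem.Set.add s := by
  induction l generalizing s with
  | nil => rfl
  | cons y l ih =>
    by_cases hyw : y = w
    · subst hyw
      have hadd : PySem.Set.add s y = s := by
        simp [PySem.Set.add, hw]
      simp [hadd, ih s hw]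
    · have hw' : w ∈ PySem.Set.add s y := by
        simp [PySem.Set.mem_add, hw]
      simp [hyw, ih _ hw']

-- a head element distinct from everything folded in stays the head
theorem pvFoldlAdd_cons (l : List String) (s : PySem.Set String) (x : String)
    (h : ∀ y ∈ l, y ≠ x) :
    l.foldl PySem.Set.add (x :: s) = x :: l.foldl PySem.Set.add s := by
  induction l generalizing s with
  | nil => rfl
  | cons y l ih =>
    have hyx : y ≠ x := h y (List.mem_cons_self)
    have hstep : PySem.Set.add (x :: s) y = x :: PySem.Set.add s y := by
      have hc : PySem.Set.contains (x :: s) y = PySem.Set.contains s y := by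
        simp [PySem.Set.contains_eq_listContains, hyx]
      simp only [PySem.Set.add, hc]
      split_ifs <;> rfl
    rw [List.foldl_cons, hstep, List.foldl_cons, ih _ (fun z hz => h z (List.mem_cons_of_mem _ hz))]

theorem pvOfList_cons_filter (w : String) (l : List String) :
    PySem.Set.ofList (w :: l) = w :: PySem.Set.ofList (l.filter (fun x => x ≠ w)) := by
  have h1 : PySem.Set.ofList (w :: l) = l.foldl PySem.Set.add [w] := by
    rw [PySem.Set.ofList_eq_foldl]; rfl
  have h2 : PySem.Set.ofList (l.filter (fun x => x ≠ w))
      = (l.filter (fun x => x ≠ w)).foldl PySem.Set.add [] := PySem.Set.ofList_eq_foldl _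
  rw [h1, h2, pvFoldlAdd_filter l [w] w (by simp)]
  exact pvFoldlAdd_cons _ [] w (fun y hy => by simpa using (List.mem_filter.mp hy).2)

-- B computes the canonical map over the deduplicated list
theorem pvAlt_eq_map (l : List String) :
    assign_value_alt l
      = (PySem.Set.ofList l).map
          (fun w => (w, (l.count w : Int) * ((PySem.Str.count w " " : Int) + 1))) := by
  induction l using assign_value_alt.induct with
  | case1 => simp [assign_value_alt]
  | case2 w rest ih =>
    have hf : (w :: rest).filter (fun x => x ≠ w) = rest.filter (fun x => x ≠ w) := by simp
    rw [hf] at ih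
    rw [assign_value_alt, hf, ih, pvOfList_cons_filter w rest, List.map_cons]
    refine congrArg₂ _ rfl ?_
    refine List.map_congr_left (fun v hv => ?_)
    have hvmem : v ∈ rest.filter (fun x => x ≠ w) := (PySem.List.mem_dedup _ v).mp hv
    have hvw : v ≠ w := by simpa using (List.mem_filter.mp hvmem).2
    have hcnt : (rest.filter (fun x => x ≠ w)).count v = (w :: rest).count v := by
      simp [List.count_filter, hvw, Ne.symm hvw]
    rw [hcnt]

-- A computes the same canonical map
theorem pvA_eq_map (l : List String) :
    assign_value l
      = (PySem.Set.ofList l).map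
          (fun w => (w, (l.count w : Int) * ((PySem.Str.count w " " : Int) + 1))) := by
  unfold assign_value
  rw [PySem.List.foldl_append_singleton_eq_map, PySem.Dict.keys_counter]
  refine List.map_congr_left (fun w _ => ?_)
  rw [PySem.Dict.getD_counter]
  split_ifs with h
  · simp only [PySem.Str.count] at h
    have h' : PySem.Chars.count w.toList [' '] = 0 := by simpa using h
    simp [h']
  · ring_nf

-- ===== VERDICT (by name: the statement is the Claim_ definition above) =====
theorem assign_value_spec : Claim_equal_assign_value := by
  intro words _
  unfold Spec_assign_value
  rw [pvA_eq_map, pvAlt_eq_map]
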